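-- pv_equiv track=rewrite | github.com/Mohit-Chaudhari/Level-Up-Coding | Queues/perfect_numbers.py | solve
-- ===== SOURCE A (Python) =====
-- def solve(A):
--     j = 0
--     q = ["1", "2"]
--
--     while j < A//2:
--         one = q[j] + "1"
--         two = q[j] + "2"
--         q.append(one)
--         q.append(two)
--         j += 1
--
--     return q[A - 1] + q[A - 1][::-1]
-- ===== SOURCE B (Python) =====
-- def solve(A):
--     # Reconstruct only the target string by walking up the implicit binary tree
--     # from heap position A+1 (children of position k are 2k and 2k+1).
--     k = A + 1
--     bits = []
--     while k >= 2:
--         bits.append('1' if k % 2 == 0 else '2')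
--         k //= 2
--     s = ''.join(reversed(bits))
--     return s + s[::-1]
-- ===== Notes on version B (the rewrite author's own statement) =====
-- stated objective: faster
-- what changed: Instead of building the whole BFS queue of 2+2*(A//2) strings, B reconstructs only the target string by walking up the implicit binary tree from heap index A+1, then mirrors it.
-- intended difference: For A in {-1, 0} A's negative index wraps around and accidentally returns '11' resp. '22'; B returns the empty palindrome '', the natural value for a non-positive 1-based position. — e.g. on solve(0): A returns "22", B returns ""
import Mathlib
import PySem

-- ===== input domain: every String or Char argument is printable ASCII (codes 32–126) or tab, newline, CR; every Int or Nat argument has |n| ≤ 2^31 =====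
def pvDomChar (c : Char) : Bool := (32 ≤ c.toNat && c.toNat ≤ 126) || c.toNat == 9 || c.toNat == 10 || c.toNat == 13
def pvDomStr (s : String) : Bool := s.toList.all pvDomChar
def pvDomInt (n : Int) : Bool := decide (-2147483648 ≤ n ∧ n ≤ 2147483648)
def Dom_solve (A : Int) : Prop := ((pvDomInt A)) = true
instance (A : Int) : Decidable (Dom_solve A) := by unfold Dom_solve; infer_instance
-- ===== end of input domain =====

-- B builds only the target string by walking the implicit binary tree upward (O(log A))
-- instead of materialising the whole BFS queue like A; return values proved equal for A ≥ 1.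

-- ===== PORT A =====
-- Strings are represented as List Char (the PySem.Chars representation); the result is
-- packed into a String at the end.  The while loop runs exactly max(A//2, 0) times
-- (j counts 0,1,2,… and the bound A//2 is fixed), ported as fuel = (A//2).toNat.
def solveLoopA (q : List (List Char)) (j : Nat) : Nat → List (List Char)
  | 0 => q
  | fuel + 1 =>
      -- q[j]; j is always in range (len q = 2 + 2*j), so the .getD [] default is never used
      let s := (PySem.List.pyGet? q (j : Int)).getD []
      let one := s ++ ['1']
      let two := s ++ ['2']
      solveLoopA (q ++ [one, two]) (j + 1) fuel

def solve (A : Int) : String :=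
  let q := solveLoopA [['1'], ['2']] 0 (PySem.Int.floordiv A 2).toNat
  -- q[A-1]: IndexError (pyGet? = none) exactly when A ≤ -2; Pre_solve excludes those inputs
  let t := (PySem.List.pyGet? q (A - 1)).getD []
  -- q[A-1] + q[A-1][::-1]; s[::-1] is reversal (PySem.List.slice?_none_none_neg_one)
  String.ofList (t ++ t.reverse)

-- ===== PORT B =====
-- the while loop of Source B: bits collected most-significant-last while k //= 2
-- (k is an int that is non-negative once the loop is entered, so Nat division is exact here;
--  for k < 2 the loop body never runs, matching toNat's clamping of a negative A+1)
def altBits (k : Nat) : List Char :=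
  if h : 2 ≤ k then (if k % 2 = 0 then '1' else '2') :: altBits (k / 2) else []
  termination_by k
  decreasing_by exact Nat.div_lt_self (by omega) (by omega)

def solve_alt (A : Int) : String :=
  let s := (altBits (A + 1).toNat).reverse   -- ''.join(reversed(bits))
  String.ofList (s ++ s.reverse)             -- s + s[::-1]

-- ===== PRECONDITION & SPEC =====
-- Pre_ excludes exactly A ≤ -2, where A's q[A-1] raises IndexError.
def Pre_solve (A : Int) : Prop := -1 ≤ A
instance (A : Int) : Decidable (Pre_solve A) := by unfold Pre_solve; infer_instance
def pvWitness_solve : Int := 5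

-- For A in {-1, 0} A's negative index wraps around and accidentally returns "11" resp. "22";
-- B returns "", the natural value for a non-positive 1-based position.
def D_solve (A : Int) : Prop := A ≤ 0
instance (A : Int) : Decidable (D_solve A) := by unfold D_solve; infer_instance
def Spec_solve (A : Int) (out : String) : Prop := ¬ D_solve A → out = solve_alt A
instance (A : Int) (out : String) : Decidable (Spec_solve A out) := by unfold Spec_solve; infer_instance
def pvDiffWitness_solve : Int := 0
def pvDiffWitnessOut_solve : String × String := ("22", "")

-- ===== CLAIM (what is proved, stated in full; the proofs are below) =====
def Claim_unchanged_solve : Prop := ∀ (A : Int), Dom_solve A → Pre_solve A → Spec_solve A (solve A)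
def Claim_changed_solve : Prop := Dom_solve (pvDiffWitness_solve) ∧ Pre_solve (pvDiffWitness_solve) ∧ D_solve (pvDiffWitness_solve) ∧ solve (pvDiffWitness_solve) = pvDiffWitnessOut_solve.1 ∧ solve_alt (pvDiffWitness_solve) = pvDiffWitnessOut_solve.2 ∧ pvDiffWitnessOut_solve.1 ≠ pvDiffWitnessOut_solve.2
def Claim_exact_solve : Prop := ∀ (A : Int), Dom_solve A → Pre_solve A → D_solve A → solve A ≠ solve_alt A

-- ===== LEMMAS AND PROOFS =====

lemma altBits_of_lt {k : Nat} (h : k < 2) : altBits k = [] := by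
  rw [altBits]; simp [show ¬ 2 ≤ k by omega]

lemma altBits_two_mul {k : Nat} (hk : 1 ≤ k) :
    altBits (2 * k) = '1' :: altBits k := by
  rw [altBits]
  simp [Nat.mul_div_cancel_left k (by norm_num : 0 < 2), (by omega : 2 ≤ 2 * k)]

lemma altBits_two_mul_add_one {k : Nat} (hk : 1 ≤ k) :
    altBits (2 * k + 1) = '2' :: altBits k := by
  rw [altBits]
  have h1 : (2 * k + 1) / 2 = k := by omega
  have h2 : (2 * k + 1) % 2 = 1 := by omega
  simp [h1, h2, (by omega : 2 ≤ 2 * k + 1)]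

lemma solve_alt_nonpos {A : Int} (h : A ≤ 0) : solve_alt A = "" := by
  have hb : altBits (A + 1).toNat = [] := altBits_of_lt (by omega)
  simp [solve_alt, hb]

-- the loop invariant: the queue is always the first 2+2*j tree strings
lemma solveLoopA_spec (fuel : Nat) : ∀ (j : Nat) (q : List (List Char)),
    q = (List.range (2 + 2 * j)).map (fun i => (altBits (i + 2)).reverse) →
    solveLoopA q j fuel
      = (List.range (2 + 2 * (j + fuel))).map (fun i => (altBits (i + 2)).reverse) := by
  induction fuel with
  | zero => intro j q hq; simpa [solveLoopA] using hq
  | succ n ih =>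
      intro j q hq
      have hj : (PySem.List.pyGet? q (j : Int)).getD [] = (altBits (j + 2)).reverse := by
        rw [PySem.List.pyGet?_natCast, hq]
        simp [(by omega : j < 2 + 2 * j)]
      rw [solveLoopA, hj]
      rw [ih (j + 1) _ ?_]
      · ring_nf
      · rw [hq]
        have e : 2 + 2 * j + 1 = 3 + 2 * j := by omega
        have hr : List.range (2 + 2 * (j + 1)) = List.range (2 + 2 * j) ++ [2 + 2 * j, 3 + 2 * j] := by
          have h4 : 2 + 2 * (j + 1) = (2 + 2 * j) + 1 + 1 := by ring
          rw [h4, List.range_succ, List.range_succ, e]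
          simp
        rw [hr, List.map_append]
        have h1 : altBits (2 + 2 * j + 2) = '1' :: altBits (j + 2) := by
          have h : 2 + 2 * j + 2 = 2 * (j + 2) := by ring
          rw [h, altBits_two_mul (by omega)]
        have h2 : altBits (3 + 2 * j + 2) = '2' :: altBits (j + 2) := by
          have h : 3 + 2 * j + 2 = 2 * (j + 2) + 1 := by ring
          rw [h, altBits_two_mul_add_one (by omega)]
        simp [h1, h2]

lemma solve_eq_alt_of_pos {A : Int} (hA : 1 ≤ A) : solve A = solve_alt A := by
  obtain ⟨a, rfl⟩ := Int.eq_ofNat_of_zero_le (by omega : (0:Int) ≤ A)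
  have ha : 1 ≤ a := by exact_mod_cast hA
  have hfd : (PySem.Int.floordiv (a : Int) 2).toNat = a / 2 := by
    have h : PySem.Int.floordiv (a : Int) 2 = ((a / 2 : Nat) : Int) := by
      exact_mod_cast PySem.Int.floordiv_natCast a 2
    omega
  have hq := solveLoopA_spec (a / 2) 0 [['1'], ['2']] (by
    have h1 : altBits 2 = ['1'] := by
      have := altBits_two_mul (k := 1) (by omega)
      simpa [altBits_of_lt] using this
    have h2 : altBits 3 = ['2'] := by
      have := altBits_two_mul_add_one (k := 1) (by omega)
      simpa [altBits_of_lt] using this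
    simp [List.range_succ, h1, h2])
  have hidx : ((a : Int) - 1) = ((a - 1 : Nat) : Int) := by omega
  have hlt : a - 1 < 2 + 2 * (0 + a / 2) := by omega
  have hget : (PySem.List.pyGet? (solveLoopA [['1'], ['2']] 0 (a / 2)) ((a : Int) - 1)).getD []
      = (altBits (a + 1)).reverse := by
    rw [hq, hidx, PySem.List.pyGet?_natCast]
    rw [List.getElem?_map, List.getElem?_range (by omega : a - 1 < 2 + 2 * (0 + a / 2))]
    simp
    have e : a - 1 + 2 = a + 1 := by omega
    rw [e]
  have halt : ((a : Int) + 1).toNat = a + 1 := by omega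
  simp only [solve, solve_alt, hfd, hget, halt]

-- ===== VERDICT (by name: the statement is the Claim_ definition above) =====
theorem solve_spec : Claim_unchanged_solve := by
  intro A _ _ hD
  exact solve_eq_alt_of_pos (by unfold D_solve at hD; omega)

theorem solve_changed : Claim_changed_solve := by
  unfold Claim_changed_solve
  refine ⟨by decide, by decide, by decide, by decide, ?_, by decide⟩
  exact solve_alt_nonpos (by decide)

theorem solve_tight : Claim_exact_solve := by
  intro A _ hPre hD
  unfold Pre_solve at hPre; unfold D_solve at hD
  have h : A = -1 ∨ A = 0 := by omega
  rcases h with rfl | rfl <;> rw [solve_alt_nonpos (by omega)] <;> decide
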